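-- pv_equiv track=rewrite | github.com/jooaosanntos/python | p1ufcg/minitestes/7miniteste/u9/cobrinha/sol1.py | cobrinha
-- ===== SOURCE A (Python) =====
-- def eh_impar(valor):
--     return valor % 2 != 0
--
-- def cobrinha(M):
--     lista_impares = []
--     cobrinha = 0
--     for indice_linha  in range(len(M)):
--         if cobrinha == 0:
--             for indice_coluna in range(len(M[0])):
--                 if eh_impar(M[indice_linha][indice_coluna]):
--                     lista_impares.append(M[indice_linha][indice_coluna])
--             cobrinha = -1
--         elif cobrinha == -1:
--             for indice_coluna in range(len(M[0]) - 1, -1, -1):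
--                 if eh_impar(M[indice_linha][indice_coluna]):
--                     lista_impares.append(M[indice_linha][indice_coluna])
--             cobrinha = 0
--
--     return lista_impares
-- ===== SOURCE B (Python) =====
-- def cobrinha(M):
--     if not M:
--         return []
--     n = len(M[0])
--
--     def impares(linha):
--         return [x for x in linha[:n] if x % 2 != 0]
--
--     def go(resto):
--         if not resto:
--             return []
--         ida = impares(resto[0])
--         if len(resto) == 1:
--             return ida
--         volta = impares(resto[1])
--         return ida + volta[::-1] + go(resto[2:])
--
--     return go(M)
-- ===== Notes on version B (the rewrite author's own statement) =====
-- stated objective: alternative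
-- what changed: B replaces A's stateful index-loop scan (toggle variable, per-cell index lookups, inline parity test during traversal) by a recursion that consumes two rows per step: each row is sliced to the first-row width and filtered for odd values first, and the filtered list of the second row of each pair is reversed wholesale; A's toggle state and countdown index loop disappear.
import Mathlib
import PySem

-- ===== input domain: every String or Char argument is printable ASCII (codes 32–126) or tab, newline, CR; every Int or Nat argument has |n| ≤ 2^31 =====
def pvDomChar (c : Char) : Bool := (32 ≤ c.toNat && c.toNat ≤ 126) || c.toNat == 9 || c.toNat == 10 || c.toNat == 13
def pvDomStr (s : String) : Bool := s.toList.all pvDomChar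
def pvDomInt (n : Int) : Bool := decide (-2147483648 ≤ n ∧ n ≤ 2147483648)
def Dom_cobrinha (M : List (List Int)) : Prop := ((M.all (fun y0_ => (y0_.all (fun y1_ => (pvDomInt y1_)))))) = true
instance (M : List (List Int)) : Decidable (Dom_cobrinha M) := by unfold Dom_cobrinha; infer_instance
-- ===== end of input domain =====

-- B recurses over the rows two at a time (filter each width-sliced row for odd values first,
-- reverse the second filtered row of each pair), removing A's toggle state and index loops;
-- objective: alternative.

-- ===== PORT A =====
def eh_impar (valor : Int) : Bool := decide (PySem.Int.mod valor 2 ≠ 0)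

-- body of A's outer "for indice_linha in range(len(M))" loop; state = (lista_impares, cobrinha)
def cobrinhaRowA (M : List (List Int)) (st : List Int × Int) (indice_linha : Int) : List Int × Int :=
  if st.2 == 0 then
    ((PySem.List.pyRange 0 ((PySem.List.pyGetD M 0 []).length : Int) 1).foldl
      (fun acc indice_coluna =>
        if eh_impar (PySem.List.pyGetD (PySem.List.pyGetD M indice_linha []) indice_coluna 0)
        then acc ++ [PySem.List.pyGetD (PySem.List.pyGetD M indice_linha []) indice_coluna 0]
        else acc) st.1, -1)
  else if st.2 == -1 then
    ((PySem.List.pyRange (((PySem.List.pyGetD M 0 []).length : Int) - 1) (-1) (-1)).foldl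
      (fun acc indice_coluna =>
        if eh_impar (PySem.List.pyGetD (PySem.List.pyGetD M indice_linha []) indice_coluna 0)
        then acc ++ [PySem.List.pyGetD (PySem.List.pyGetD M indice_linha []) indice_coluna 0]
        else acc) st.1, 0)
  else st

def cobrinha (M : List (List Int)) : List Int :=
  ((PySem.List.pyRange 0 (M.length : Int) 1).foldl (cobrinhaRowA M) ([], 0)).1

-- ===== PORT B =====
-- Source B's helper "impares(linha)": slice the row to the first-row width, keep the odd values
def impares (n : Int) (linha : List Int) : List Int :=
  (PySem.List.slice linha (some 0) (some n)).filter (fun x => decide (PySem.Int.mod x 2 ≠ 0))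

-- Source B's "go(resto)": two rows per step; volta[::-1] is List.reverse, resto[2:] is the match tail
def cobrinhaGo (n : Int) : List (List Int) → List Int
  | [] => []
  | [r] => impares n r
  | r0 :: r1 :: resto => impares n r0 ++ (impares n r1).reverse ++ cobrinhaGo n resto

def cobrinha_alt (M : List (List Int)) : List Int :=
  match M with
  | [] => []
  | first :: _ => cobrinhaGo (first.length : Int) M

-- ===== PRECONDITION & SPEC =====
-- Pre_ excludes ragged matrices having a row shorter than the first row: there A raises
-- IndexError (it indexes every row at columns 0..len(M[0])-1), so A returns no value.
def Pre_cobrinha (M : List (List Int)) : Prop :=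
  ∀ row ∈ M, (M.headD []).length ≤ row.length
instance (M : List (List Int)) : Decidable (Pre_cobrinha M) := by unfold Pre_cobrinha; infer_instance

def pvWitness_cobrinha : List (List Int) := [[1, 2, 3], [4, 5, 6], [7, 8, 9]]

def Spec_cobrinha (M : List (List Int)) (out : List Int) : Prop := out = cobrinha_alt M
instance (M : List (List Int)) (out : List Int) : Decidable (Spec_cobrinha M out) := by unfold Spec_cobrinha; infer_instance

-- ===== CLAIM (what is proved, stated in full; the proofs are below) =====
def Claim_equal_cobrinha : Prop := ∀ (M : List (List Int)), Dom_cobrinha M → Pre_cobrinha M → Spec_cobrinha M (cobrinha M)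

-- ===== LEMMAS AND PROOFS =====

def pvOdd (x : Int) : Bool := decide (PySem.Int.mod x 2 ≠ 0)

-- the forward snake segment of the row at (global) index i, for column width n
def pvSegN (rows : List (List Int)) (i : Int) (n : Nat) : List Int :=
  (PySem.List.pyRange 0 (n : Int) 1).map
    (fun j => PySem.List.pyGetD (PySem.List.pyGetD rows i []) j 0)

-- the common reference value: snake order, two rows per step, odds filtered per row
def pvSnake (n : Nat) : List (List Int) → List Int
  | [] => []
  | [r] => (r.take n).filter pvOdd
  | r0 :: r1 :: rest =>
      (r0.take n).filter pvOdd ++ ((r1.take n).filter pvOdd).reverse ++ pvSnake n rest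

-- two-rows-at-a-time induction principle
theorem pvTwoStep {P : List (List Int) → Prop} (h0 : P []) (h1 : ∀ r, P [r])
    (h2 : ∀ r0 r1 rest, P rest → P (r0 :: r1 :: rest)) : ∀ l, P l
  | [] => h0
  | [r] => h1 r
  | r0 :: r1 :: rest => h2 r0 r1 rest (pvTwoStep h0 h1 h2 rest)

-- A's body on a state with toggle 0: append the odd-filtered forward segment, toggle to -1
theorem rowA_fwd (M : List (List Int)) (lst : List Int) (i : Int) :
    cobrinhaRowA M (lst, 0) i
      = (lst ++ (pvSegN M i (PySem.List.pyGetD M 0 []).length).filter pvOdd, -1) := by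
  simp only [cobrinhaRowA]
  norm_num
  rw [PySem.List.foldl_append_if]
  rw [pvSegN, List.filter_map]
  rfl

-- A's body on a state with toggle -1: append the odd-filtered reversed segment, toggle to 0
theorem rowA_bwd (M : List (List Int)) (lst : List Int) (i : Int) :
    cobrinhaRowA M (lst, -1) i
      = (lst ++ ((pvSegN M i (PySem.List.pyGetD M 0 []).length).reverse).filter pvOdd, 0) := by
  simp only [cobrinhaRowA]
  norm_num
  rw [PySem.List.pyRange_neg_one_eq_reverse,
    show (-1:ℤ)+1 = 0 from by norm_num,
    show ((((PySem.List.pyGetD M 0 []).length : Int)) - 1 + 1) = ((PySem.List.pyGetD M 0 []).length : Int) from by ring]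
  rw [PySem.List.foldl_append_if, List.filter_reverse, List.map_reverse, pvSegN, List.filter_map]
  rfl

-- main invariant for A: after m rows the accumulator is the odd-filtered snake prefix and the
-- toggle equals the row-index parity
theorem foldA_range (M : List (List Int)) (m : Nat) :
    (List.range m).foldl (fun (st : List Int × Int) (k : Nat) => cobrinhaRowA M st (k : Int)) ([], 0)
      = (((List.range m).flatMap
            (fun (k : Nat) =>
              if k % 2 = 0 then pvSegN M (k : Int) (PySem.List.pyGetD M 0 []).length
              else (pvSegN M (k : Int) (PySem.List.pyGetD M 0 []).length).reverse)).filter pvOdd,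
         if m % 2 = 0 then (0 : Int) else -1) := by
  induction m with
  | zero => simp
  | succ m ih =>
    rw [List.range_succ, List.foldl_append, ih, List.foldl_cons, List.foldl_nil]
    by_cases hm : m % 2 = 0
    · have h2 : (m + 1) % 2 = 1 := by omega
      rw [if_pos hm, rowA_fwd]
      simp [List.filter_append, hm, h2, List.flatMap_append]
    · have h2 : (m + 1) % 2 = 0 := by omega
      rw [if_neg hm, rowA_bwd]
      simp [List.filter_append, hm, h2, List.flatMap_append]

-- a well-indexed segment is a take of the row
theorem segN_take (rows : List (List Int)) (k : Nat) (n : Nat)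
    (hk : k < rows.length) (hn : n ≤ (rows[k]'hk).length) :
    pvSegN rows (k : Int) n = (rows[k]'hk).take n := by
  simp only [pvSegN, PySem.List.pyRange_zero_natCast, List.map_map]
  apply List.ext_getElem
  · simp; omega
  · intro j h1 h2
    have hj : j < n := by simpa using h1
    simp only [List.getElem_map, List.getElem_range, Function.comp]
    rw [PySem.List.pyGetD_natCast, PySem.List.pyGetD_natCast,
      List.getD_eq_getElem _ _ hk, List.getD_eq_getElem _ _ (by omega), List.getElem_take]

-- shifting the global index past two rows
theorem segN_shift (r0 r1 : List Int) (rest : List (List Int)) (k : Nat) (n : Nat) :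
    pvSegN (r0 :: r1 :: rest) ((k + 2 : Nat) : Int) n = pvSegN rest (k : Int) n := by
  have h : PySem.List.pyGetD (r0 :: r1 :: rest) ((k + 2 : Nat) : Int) []
      = PySem.List.pyGetD rest (k : Int) [] := by
    rw [PySem.List.pyGetD_natCast, PySem.List.pyGetD_natCast]
    simp [List.getD]
  simp only [pvSegN, h]

theorem range_two_step (m : Nat) :
    List.range (m + 2) = 0 :: 1 :: (List.range m).map (fun k => k + 2) := by
  rw [List.range_succ_eq_map, List.range_succ_eq_map, List.map_cons, List.map_map]
  rfl

-- the flatMap characterisation of A equals the two-rows-per-step reference value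
theorem flat_eq_snake :
    ∀ (rows : List (List Int)) (n : Nat), (∀ r ∈ rows, n ≤ r.length) →
      ((List.range rows.length).flatMap
          (fun (k : Nat) => if k % 2 = 0 then pvSegN rows (k : Int) n
                            else (pvSegN rows (k : Int) n).reverse)).filter pvOdd
        = pvSnake n rows := by
  refine pvTwoStep ?_ ?_ ?_
  · intro n _; simp [pvSnake]
  · intro r n h
    have h0 : n ≤ r.length := h r (by simp)
    simp only [List.length_singleton, List.range_one, List.flatMap_cons, List.flatMap_nil,
      Nat.zero_mod, List.append_nil, pvSnake]
    rw [segN_take [r] 0 n (by simp) (by simpa using h0)]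
    simp
  · intro r0 r1 rest ih n h
    have hl : (r0 :: r1 :: rest).length = rest.length + 2 := by simp
    rw [hl, range_two_step, List.flatMap_cons, List.flatMap_cons, List.flatMap_map]
    have e0 : pvSegN (r0 :: r1 :: rest) (0 : Int) n = r0.take n := by
      simpa using segN_take (r0 :: r1 :: rest) 0 n (by simp) (by simpa using h r0 (by simp))
    have e1 : pvSegN (r0 :: r1 :: rest) (1 : Int) n = r1.take n := by
      simpa using segN_take (r0 :: r1 :: rest) 1 n (by simp) (by simpa using h r1 (by simp))
    have hp : ∀ a : Nat, (a + 2) % 2 = a % 2 := fun a => by omega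
    simp only [hp, segN_shift]
    norm_num [e0, e1]
    rw [ih n (fun r hr => h r (by simp [hr]))]
    simp [pvSnake]

-- B's recursion computes the reference value (slices become takes, filters match)
theorem go_eq_snake (n : Nat) :
    ∀ rows : List (List Int), cobrinhaGo (n : Int) rows = pvSnake n rows := by
  refine pvTwoStep ?_ ?_ ?_
  · rfl
  · intro r
    simp only [cobrinhaGo, pvSnake, impares]
    rw [PySem.List.slice_zero_start, PySem.List.slice_to_natCast]
    rfl
  · intro r0 r1 rest ih
    simp only [cobrinhaGo, pvSnake, impares, ih]
    rw [PySem.List.slice_zero_start, PySem.List.slice_to_natCast,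
      PySem.List.slice_zero_start, PySem.List.slice_to_natCast]
    rfl

theorem main_eq (M : List (List Int)) (hpre : Pre_cobrinha M) : cobrinha M = cobrinha_alt M := by
  cases M with
  | nil => decide
  | cons first rest =>
    have hfirst : PySem.List.pyGetD (first :: rest) 0 [] = first := by
      simp [PySem.List.pyGetD, PySem.List.pyGet?, PySem.List.pyIdx?]
    have hA : cobrinha (first :: rest)
        = ((List.range (first :: rest).length).flatMap
            (fun (k : Nat) => if k % 2 = 0 then pvSegN (first :: rest) (k : Int) first.length
                              else (pvSegN (first :: rest) (k : Int) first.length).reverse)).filter pvOdd := by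
      rw [cobrinha, PySem.List.pyRange_zero_natCast, List.foldl_map, foldA_range, hfirst]
    rw [hA, flat_eq_snake (first :: rest) first.length (by simpa [Pre_cobrinha] using hpre)]
    show _ = cobrinhaGo (first.length : Int) (first :: rest)
    rw [go_eq_snake]

-- ===== VERDICT (by name: the statement is the Claim_ definition above) =====
theorem cobrinha_spec : Claim_equal_cobrinha := by
  intro M _ hpre
  exact main_eq M hpre
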